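-- pv_equiv track=rewrite | github.com/siddartha-ai/galaxies-puzzle | chen.py | galaxy_is_complete
-- ===== SOURCE A (Python) =====
-- from typing import Dict, List, Optional, Set, Tuple
--
-- Rect = Tuple[int, int, int, int]   # (x, y, w, h) in cell units
--
-- def galaxy_is_complete(rect: Rect, edges: Set[Tuple[str, int, int]]) -> bool:
--     """True when all 4 sides of the rectangle are in `edges`."""
--     rx, ry, rw, rh = rect
--     for x in range(rx, rx + rw):
--         if ('h', x, ry) not in edges or ('h', x, ry + rh) not in edges:
--             return False
--     for y in range(ry, ry + rh):
--         if ('v', rx, y) not in edges or ('v', rx + rw, y) not in edges: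
--             return False
--     return True
-- ===== SOURCE B (Python) =====
-- def galaxy_is_complete(rect, edges):
--     """True when all 4 sides of the rectangle are in `edges`."""
--     rx, ry, rw, rh = rect
--     top = bottom = left = right = 0
--     for kind, ex, ey in edges:
--         if kind == 'h' and rx <= ex < rx + rw:
--             if ey == ry:
--                 top += 1
--             if ey == ry + rh:
--                 bottom += 1
--         elif kind == 'v' and ry <= ey < ry + rh:
--             if ex == rx:
--                 left += 1
--             if ex == rx + rw:
--                 right += 1
--     return top == rw and bottom == rw and left == rh and right == rh
-- ===== Notes on version B (the rewrite author's own statement) =====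
-- stated objective: alternative
-- what changed: B makes a single pass over the edge set, counting the edges that fall on each of the rectangle's four sides, and compares the four counts with the side lengths, instead of A's two loops over the side coordinates doing one membership probe per required edge; Pre_ excludes rectangles with negative width or height (no rectangle in the puzzle grid has them; on such degenerate input A's vacuous True and B's False are both defensible) and duplicate-carrying edge lists (edges is a Python set, so a list with duplicates represents no actual input).
-- outside the precondition, e.g. on galaxy_is_complete((0, 0, -1, -1), set()): A returns True, B returns False
import Mathlib
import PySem

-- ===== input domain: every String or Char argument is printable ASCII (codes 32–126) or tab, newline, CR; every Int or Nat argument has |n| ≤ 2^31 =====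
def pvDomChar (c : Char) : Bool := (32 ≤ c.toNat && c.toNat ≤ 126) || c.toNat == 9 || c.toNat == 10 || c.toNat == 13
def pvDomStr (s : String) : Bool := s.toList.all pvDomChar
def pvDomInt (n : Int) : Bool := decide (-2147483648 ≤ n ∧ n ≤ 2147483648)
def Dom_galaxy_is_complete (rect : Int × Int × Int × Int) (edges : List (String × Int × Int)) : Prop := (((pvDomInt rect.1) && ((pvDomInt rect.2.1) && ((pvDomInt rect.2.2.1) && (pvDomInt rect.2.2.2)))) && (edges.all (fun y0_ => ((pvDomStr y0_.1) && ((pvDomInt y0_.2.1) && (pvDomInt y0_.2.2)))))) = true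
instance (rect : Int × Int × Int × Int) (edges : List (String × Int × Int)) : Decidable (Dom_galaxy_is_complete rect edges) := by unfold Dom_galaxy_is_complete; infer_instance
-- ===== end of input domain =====

-- B counts, in one pass over the edge set, the edges lying on each of the rectangle's four
-- sides and compares the counts with the side lengths; A scans the side coordinates testing
-- membership per required edge. Objective: alternative (cost in |edges| instead of w+h).


-- ===== PORT A =====
-- first loop of A: 'for x in range(rx, rx+rw)' starting at x with n iterations left,
-- early-return False if either horizontal edge is missing
def pvALoopH (edges : List (String × Int × Int)) (ry rh : Int) : Int → Nat → Bool
  | _, 0 => true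
  | x, n + 1 =>
    if !(edges.contains ("h", x, ry)) || !(edges.contains ("h", x, ry + rh)) then false
    else pvALoopH edges ry rh (x + 1) n

-- second loop of A: 'for y in range(ry, ry+rh)', early-return False if either vertical edge is missing
def pvALoopV (edges : List (String × Int × Int)) (rx rw : Int) : Int → Nat → Bool
  | _, 0 => true
  | y, n + 1 =>
    if !(edges.contains ("v", rx, y)) || !(edges.contains ("v", rx + rw, y)) then false
    else pvALoopV edges rx rw (y + 1) n

def galaxy_is_complete (rect : Int × Int × Int × Int) (edges : List (String × Int × Int)) : Bool :=
  let rx := rect.1; let ry := rect.2.1; let rw := rect.2.2.1; let rh := rect.2.2.2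
  -- range(rx, rx+rw) runs rw.toNat times from rx; range(ry, ry+rh) runs rh.toNat times from ry
  if pvALoopH edges ry rh rx rw.toNat then
    pvALoopV edges rx rw ry rh.toNat
  else false

-- ===== PORT B =====
-- loop body of B: classify one edge and bump the (top, bottom, left, right) counters
def pvBStep (rx ry rw rh : Int) (acc : Int × Int × Int × Int) (e : String × Int × Int) :
    Int × Int × Int × Int :=
  if e.1 = "h" ∧ rx ≤ e.2.1 ∧ e.2.1 < rx + rw then
    let top := if e.2.2 = ry then acc.1 + 1 else acc.1
    let bottom := if e.2.2 = ry + rh then acc.2.1 + 1 else acc.2.1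
    (top, bottom, acc.2.2.1, acc.2.2.2)
  else if e.1 = "v" ∧ ry ≤ e.2.2 ∧ e.2.2 < ry + rh then
    let left := if e.2.1 = rx then acc.2.2.1 + 1 else acc.2.2.1
    let right := if e.2.1 = rx + rw then acc.2.2.2 + 1 else acc.2.2.2
    (acc.1, acc.2.1, left, right)
  else acc

def galaxy_is_complete_alt (rect : Int × Int × Int × Int) (edges : List (String × Int × Int)) : Bool :=
  let rx := rect.1; let ry := rect.2.1; let rw := rect.2.2.1; let rh := rect.2.2.2
  let c := edges.foldl (pvBStep rx ry rw rh) (0, 0, 0, 0)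
  c.1 == rw && c.2.1 == rw && c.2.2.1 == rh && c.2.2.2 == rh

-- ===== PRECONDITION & SPEC =====
-- Pre_ restricts to the natural domain: rectangles with nonnegative width and height (no
-- rectangle in the puzzle grid has negative dimensions; on such degenerate input A's vacuous
-- True and B's False are both defensible) and duplicate-free edge lists (edges is a Python
-- set under the type convention, so a duplicate-carrying list represents no actual input).
def Pre_galaxy_is_complete (rect : Int × Int × Int × Int) (edges : List (String × Int × Int)) : Prop :=
  0 ≤ rect.2.2.1 ∧ 0 ≤ rect.2.2.2 ∧ edges.Nodup
instance (rect : Int × Int × Int × Int) (edges : List (String × Int × Int)) : Decidable (Pre_galaxy_is_complete rect edges) := by unfold Pre_galaxy_is_complete; infer_instance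
def pvWitness_galaxy_is_complete : (Int × Int × Int × Int) × (List (String × Int × Int)) :=
  ((0, 0, 1, 1), [("h", 0, 0), ("h", 0, 1), ("v", 0, 0), ("v", 1, 0)])

def Spec_galaxy_is_complete (rect : Int × Int × Int × Int) (edges : List (String × Int × Int)) (out : Bool) : Prop := out = galaxy_is_complete_alt rect edges
instance (rect : Int × Int × Int × Int) (edges : List (String × Int × Int)) (out : Bool) : Decidable (Spec_galaxy_is_complete rect edges out) := by unfold Spec_galaxy_is_complete; infer_instance

-- ===== CLAIM (what is proved, stated in full; the proofs are below) =====
def Claim_equal_galaxy_is_complete : Prop := ∀ (rect : Int × Int × Int × Int) (edges : List (String × Int × Int)), Dom_galaxy_is_complete rect edges → Pre_galaxy_is_complete rect edges → Spec_galaxy_is_complete rect edges (galaxy_is_complete rect edges)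

-- ===== LEMMAS AND PROOFS =====

theorem pvALoopH_eq_all (edges : List (String × Int × Int)) (ry rh : Int) :
    ∀ (n : Nat) (x : Int),
      pvALoopH edges ry rh x n
        = (PySem.List.pyRange x (x + n) 1).all
            (fun x' => edges.contains ("h", x', ry) && edges.contains ("h", x', ry + rh)) := by
  intro n
  induction n with
  | zero => intro x; rw [PySem.List.pyRange_one_eq_nil (by omega)]; rfl
  | succ n ih =>
    intro x
    rw [PySem.List.pyRange_one_cons (by omega), List.all_cons]
    simp only [pvALoopH]
    rw [ih (x + 1), show (x + 1 : Int) + n = x + ((n : Nat) + 1 : Nat) from by push_cast; ring]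
    by_cases h1 : edges.contains ("h", x, ry) <;>
      by_cases h2 : edges.contains ("h", x, ry + rh) <;> simp

theorem pvALoopV_eq_all (edges : List (String × Int × Int)) (rx rw : Int) :
    ∀ (n : Nat) (y : Int),
      pvALoopV edges rx rw y n
        = (PySem.List.pyRange y (y + n) 1).all
            (fun y' => edges.contains ("v", rx, y') && edges.contains ("v", rx + rw, y')) := by
  intro n
  induction n with
  | zero => intro y; rw [PySem.List.pyRange_one_eq_nil (by omega)]; rfl
  | succ n ih =>
    intro y
    rw [PySem.List.pyRange_one_cons (by omega), List.all_cons]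
    simp only [pvALoopV]
    rw [ih (y + 1), show (y + 1 : Int) + n = y + ((n : Nat) + 1 : Nat) from by push_cast; ring]
    by_cases h1 : edges.contains ("v", rx, y) <;>
      by_cases h2 : edges.contains ("v", rx + rw, y) <;> simp

-- the Bool side-predicates the four counters of B count
def pvPT (rx ry rw : Int) (e : String × Int × Int) : Bool :=
  decide (e.1 = "h" ∧ rx ≤ e.2.1 ∧ e.2.1 < rx + rw ∧ e.2.2 = ry)
def pvPB (rx ry rw rh : Int) (e : String × Int × Int) : Bool :=
  decide (e.1 = "h" ∧ rx ≤ e.2.1 ∧ e.2.1 < rx + rw ∧ e.2.2 = ry + rh)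
def pvPL (rx ry rh : Int) (e : String × Int × Int) : Bool :=
  decide (e.1 = "v" ∧ ry ≤ e.2.2 ∧ e.2.2 < ry + rh ∧ e.2.1 = rx)
def pvPR (rx ry rw rh : Int) (e : String × Int × Int) : Bool :=
  decide (e.1 = "v" ∧ ry ≤ e.2.2 ∧ e.2.2 < ry + rh ∧ e.2.1 = rx + rw)

-- one step of B's fold, component by component
theorem pvBStep_fst (rx ry rw rh : Int) (acc : Int × Int × Int × Int) (e : String × Int × Int) :
    (pvBStep rx ry rw rh acc e).1 = acc.1 + (if pvPT rx ry rw e then 1 else 0) := by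
  simp only [pvBStep, pvPT, decide_eq_true_eq]
  by_cases hh : e.1 = "h" ∧ rx ≤ e.2.1 ∧ e.2.1 < rx + rw
  · by_cases ht : e.2.2 = ry
    · simp [hh, ht]
    · simp [hh, ht]
  · have hp : ¬(e.1 = "h" ∧ rx ≤ e.2.1 ∧ e.2.1 < rx + rw ∧ e.2.2 = ry) :=
      fun h => hh ⟨h.1, h.2.1, h.2.2.1⟩
    simp only [if_neg hh, if_neg hp, add_zero]
    split_ifs <;> simp

theorem pvBStep_snd1 (rx ry rw rh : Int) (acc : Int × Int × Int × Int) (e : String × Int × Int) :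
    (pvBStep rx ry rw rh acc e).2.1 = acc.2.1 + (if pvPB rx ry rw rh e then 1 else 0) := by
  simp only [pvBStep, pvPB, decide_eq_true_eq]
  by_cases hh : e.1 = "h" ∧ rx ≤ e.2.1 ∧ e.2.1 < rx + rw
  · by_cases hb : e.2.2 = ry + rh
    · simp [hh, hb]
    · simp [hh, hb]
  · have hp : ¬(e.1 = "h" ∧ rx ≤ e.2.1 ∧ e.2.1 < rx + rw ∧ e.2.2 = ry + rh) :=
      fun h => hh ⟨h.1, h.2.1, h.2.2.1⟩
    simp only [if_neg hh, if_neg hp, add_zero]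
    split_ifs <;> simp

theorem pvBStep_snd21 (rx ry rw rh : Int) (acc : Int × Int × Int × Int) (e : String × Int × Int) :
    (pvBStep rx ry rw rh acc e).2.2.1 = acc.2.2.1 + (if pvPL rx ry rh e then 1 else 0) := by
  simp only [pvBStep, pvPL, decide_eq_true_eq]
  by_cases hh : e.1 = "h" ∧ rx ≤ e.2.1 ∧ e.2.1 < rx + rw
  · have hp : ¬(e.1 = "v" ∧ ry ≤ e.2.2 ∧ e.2.2 < ry + rh ∧ e.2.1 = rx) := by
      rintro ⟨hv, -⟩; rw [hv] at hh; exact absurd hh.1 (by decide)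
    simp [hh]
  · by_cases hv : e.1 = "v" ∧ ry ≤ e.2.2 ∧ e.2.2 < ry + rh
    · by_cases hl : e.2.1 = rx
      · simp [hv, hl]
      · simp [hv, hl]
    · have hp : ¬(e.1 = "v" ∧ ry ≤ e.2.2 ∧ e.2.2 < ry + rh ∧ e.2.1 = rx) :=
        fun h => hv ⟨h.1, h.2.1, h.2.2.1⟩
      simp [hh, hv, hp]

theorem pvBStep_snd22 (rx ry rw rh : Int) (acc : Int × Int × Int × Int) (e : String × Int × Int) :
    (pvBStep rx ry rw rh acc e).2.2.2 = acc.2.2.2 + (if pvPR rx ry rw rh e then 1 else 0) := by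
  simp only [pvBStep, pvPR, decide_eq_true_eq]
  by_cases hh : e.1 = "h" ∧ rx ≤ e.2.1 ∧ e.2.1 < rx + rw
  · have hp : ¬(e.1 = "v" ∧ ry ≤ e.2.2 ∧ e.2.2 < ry + rh ∧ e.2.1 = rx + rw) := by
      rintro ⟨hv, -⟩; rw [hv] at hh; exact absurd hh.1 (by decide)
    simp [hh]
  · by_cases hv : e.1 = "v" ∧ ry ≤ e.2.2 ∧ e.2.2 < ry + rh
    · by_cases hr' : e.2.1 = rx + rw
      · simp [hv, hr']
      · simp [hv, hr']
    · have hp : ¬(e.1 = "v" ∧ ry ≤ e.2.2 ∧ e.2.2 < ry + rh ∧ e.2.1 = rx + rw) :=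
        fun h => hv ⟨h.1, h.2.1, h.2.2.1⟩
      simp [hh, hv, hp]

-- B's fold computes exactly the four countP's
theorem pvBFold_eq_countP (rx ry rw rh : Int) (edges : List (String × Int × Int))
    (acc : Int × Int × Int × Int) :
    edges.foldl (pvBStep rx ry rw rh) acc
      = (acc.1 + (edges.countP (pvPT rx ry rw) : Int),
         acc.2.1 + (edges.countP (pvPB rx ry rw rh) : Int),
         acc.2.2.1 + (edges.countP (pvPL rx ry rh) : Int),
         acc.2.2.2 + (edges.countP (pvPR rx ry rw rh) : Int)) := by
  induction edges generalizing acc with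
  | nil => simp
  | cons e es ih =>
    rw [List.foldl_cons, ih]
    simp only [List.countP_cons, Prod.ext_iff,
      pvBStep_fst, pvBStep_snd1, pvBStep_snd21, pvBStep_snd22]
    refine ⟨?_, ?_, ?_, ?_⟩ <;> split_ifs <;> push_cast <;> omega

-- generic subset-by-counting lemma: on a duplicate-free list, the number of elements hitting
-- an injectively-indexed duplicate-free target family equals the family size iff every target is present
theorem pvCountP_eq_iff {α : Type} [DecidableEq α] (edges : List α) (hnd : edges.Nodup)
    (r : List Int) (hr : r.Nodup) (f : Int → α) (hf : Function.Injective f)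
    (p : α → Bool) (hp : ∀ e, p e = true ↔ ∃ x ∈ r, e = f x) :
    (edges.countP p = r.length) ↔ ∀ x ∈ r, f x ∈ edges := by
  have hsub : edges.filter p ⊆ r.map f := by
    intro e he
    rcases List.mem_filter.mp he with ⟨-, hpe⟩
    rcases (hp e).mp hpe with ⟨x, hx, rfl⟩
    exact List.mem_map_of_mem hx
  have hnf : (edges.filter p).Nodup := hnd.filter p
  have hsp : List.Subperm (edges.filter p) (r.map f) := List.subperm_of_subset hnf hsub
  rw [List.countP_eq_length_filter]
  constructor
  · intro hlen x hx
    have hperm : List.Perm (edges.filter p) (r.map f) :=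
      hsp.perm_of_length_le (by simp [hlen])
    have : f x ∈ edges.filter p := hperm.mem_iff.mpr (List.mem_map_of_mem hx)
    exact (List.mem_filter.mp this).1
  · intro hall
    have hsub2 : r.map f ⊆ edges.filter p := by
      intro e he
      rcases List.mem_map.mp he with ⟨x, hx, rfl⟩
      exact List.mem_filter.mpr ⟨hall x hx, (hp (f x)).mpr ⟨x, hx, rfl⟩⟩
    have hsp2 : List.Subperm (r.map f) (edges.filter p) := List.subperm_of_subset (hr.map hf) hsub2
    have h1 := hsp.length_le
    have h2 := hsp2.length_le
    simp only [List.length_map] at h1 h2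
    omega

-- specialisation: the Int counter equals max (b-a) 0 iff the whole side is present
theorem pvCount_side {α : Type} [DecidableEq α] (edges : List α) (hnd : edges.Nodup)
    (a b : Int) (f : Int → α) (hf : Function.Injective f) (p : α → Bool)
    (hp : ∀ e, p e = true ↔ ∃ x ∈ PySem.List.pyRange a b 1, e = f x) :
    (((edges.countP p : Int)) = max (b - a) 0
      ↔ ∀ x ∈ PySem.List.pyRange a b 1, f x ∈ edges) := by
  rw [← pvCountP_eq_iff edges hnd _ (PySem.List.nodup_pyRange_one a b) f hf p hp]
  rw [PySem.List.length_pyRange_one]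
  omega

theorem galaxy_is_complete_spec : Claim_equal_galaxy_is_complete := by
  intro rect edges _hdom hpre
  obtain ⟨hw0, hh0, hnd⟩ := hpre
  unfold Spec_galaxy_is_complete galaxy_is_complete galaxy_is_complete_alt
  obtain ⟨rx, ry, rw, rh⟩ := rect
  simp only at hw0 hh0
  dsimp only
  have hwcast : rx + (rw.toNat : Int) = rx + rw := by omega
  have hhcast : ry + (rh.toNat : Int) = ry + rh := by omega
  rw [pvALoopH_eq_all, pvALoopV_eq_all, hwcast, hhcast, pvBFold_eq_countP]
  rw [show ∀ b c : Bool, (if b = true then c else false) = (b && c) from by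
    intro b c; cases b <;> simp]
  rw [Bool.eq_iff_iff]
  simp only [Bool.and_eq_true, List.all_eq_true, Bool.and_eq_true, beq_iff_eq, zero_add,
    List.contains_iff_mem]
  have hT := pvCount_side edges hnd rx (rx + rw) (fun x => (("h" : String), x, ry))
    (fun x y h => by simpa using h) (pvPT rx ry rw)
    (by intro e; simp [pvPT, PySem.List.mem_pyRange_one]; constructor
        · rintro ⟨h1, h2, h3, h4⟩
          exact ⟨e.2.1, ⟨h2, h3⟩, by rcases e with ⟨s, u, v⟩; simp_all⟩
        · rintro ⟨x, ⟨hx1, hx2⟩, rfl⟩; exact ⟨rfl, hx1, hx2, rfl⟩)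
  have hB := pvCount_side edges hnd rx (rx + rw) (fun x => (("h" : String), x, ry + rh))
    (fun x y h => by simpa using h) (pvPB rx ry rw rh)
    (by intro e; simp [pvPB, PySem.List.mem_pyRange_one]; constructor
        · rintro ⟨h1, h2, h3, h4⟩
          exact ⟨e.2.1, ⟨h2, h3⟩, by rcases e with ⟨s, u, v⟩; simp_all⟩
        · rintro ⟨x, ⟨hx1, hx2⟩, rfl⟩; exact ⟨rfl, hx1, hx2, rfl⟩)
  have hL := pvCount_side edges hnd ry (ry + rh) (fun y => (("v" : String), rx, y))
    (fun x y h => by simpa using h) (pvPL rx ry rh)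
    (by intro e; simp [pvPL, PySem.List.mem_pyRange_one]; constructor
        · rintro ⟨h1, h2, h3, h4⟩
          exact ⟨e.2.2, ⟨h2, h3⟩, by rcases e with ⟨s, u, v⟩; simp_all⟩
        · rintro ⟨y, ⟨hy1, hy2⟩, rfl⟩; exact ⟨rfl, hy1, hy2, rfl⟩)
  have hR := pvCount_side edges hnd ry (ry + rh) (fun y => (("v" : String), rx + rw, y))
    (fun x y h => by simpa using h) (pvPR rx ry rw rh)
    (by intro e; simp [pvPR, PySem.List.mem_pyRange_one]; constructor
        · rintro ⟨h1, h2, h3, h4⟩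
          exact ⟨e.2.2, ⟨h2, h3⟩, by rcases e with ⟨s, u, v⟩; simp_all⟩
        · rintro ⟨y, ⟨hy1, hy2⟩, rfl⟩; exact ⟨rfl, hy1, hy2, rfl⟩)
  have hw : max (rx + rw - rx) 0 = rw := by omega
  have hh' : max (ry + rh - ry) 0 = rh := by omega
  rw [hw] at hT hB; rw [hh'] at hL hR
  rw [hT, hB, hL, hR]
  constructor
  · rintro ⟨hH, hV⟩
    exact ⟨⟨⟨fun x hx => (hH x hx).1, fun x hx => (hH x hx).2⟩,
            fun y hy => (hV y hy).1⟩, fun y hy => (hV y hy).2⟩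
  · rintro ⟨⟨⟨h1, h2⟩, h3⟩, h4⟩
    exact ⟨fun x hx => ⟨h1 x hx, h2 x hx⟩, fun y hy => ⟨h3 y hy, h4 y hy⟩⟩

-- ===== VERDICT (by name: the statement is the Claim_ definition above) =====
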